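-- pv_equiv track=rewrite | github.com/OwlVi/Coding-py | Codopy/lab13 List Methods/06 listsort.py | check_order
-- ===== SOURCE A (Python) =====
-- def check_order(l):
--     countx = 0
--     county = 0
--     x = ''
--     for i in range(1,len(l)):
--         if l.count(l[i]) == len(l):
--             countx += 1
--             county += 1
--         elif l[i] > l[i-1]:
--             countx += 1
--         elif l[i] < l[i-1]:
--             county += 1
--
--     if countx == 0 and county == 0 and len(l) == 0:
--         x = "The list is empty."
--     elif countx < county and countx == 0 and countx != len(l):
--         x = "The list is in non-increasing order."
--     elif countx > county and county == 0 and countx != len(l) :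
--         x = "The list is in non-decreasing order."
--     elif countx == len(l)-1 and county == len(l)-1:
--         x = "The list is in non-increasing and non-decreasing order."
--     else:
--         x = "The list is in random order."
--     return x
-- ===== SOURCE B (Python) =====
-- def check_order(l):
--     if not l:
--         return "The list is empty."
--     asc = l == sorted(l)
--     desc = l == sorted(l, reverse=True)
--     if asc and desc:
--         return "The list is in non-increasing and non-decreasing order."
--     if asc:
--         return "The list is in non-decreasing order."
--     if desc:
--         return "The list is in non-increasing order."
--     return "The list is in random order."
-- ===== Notes on version B (the rewrite author's own statement) =====
-- stated objective: faster
-- what changed: Replaces A's quadratic neighbour scan (a per-element all-equal membership count inside the loop) and five-way two-counter branch cascade by an empty guard plus two sort-and-compare checks.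
import Mathlib
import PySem

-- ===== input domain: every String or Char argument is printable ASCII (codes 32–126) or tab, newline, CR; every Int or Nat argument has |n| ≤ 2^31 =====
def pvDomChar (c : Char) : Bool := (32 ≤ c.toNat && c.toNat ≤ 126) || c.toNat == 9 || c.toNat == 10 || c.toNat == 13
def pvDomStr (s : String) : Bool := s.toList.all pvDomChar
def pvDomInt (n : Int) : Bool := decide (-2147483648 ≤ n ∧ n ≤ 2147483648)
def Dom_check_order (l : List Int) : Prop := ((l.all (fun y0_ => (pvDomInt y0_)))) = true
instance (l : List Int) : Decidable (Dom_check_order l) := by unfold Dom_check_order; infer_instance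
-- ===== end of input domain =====

-- B replaces A's quadratic neighbour scan (with a per-element all-equal membership count) and
-- five-way counter branch cascade by an empty guard plus two sort-and-compare checks.

-- ===== PORT A =====
def check_order (l : List Int) : String :=
  let s := (PySem.List.pyRange 1 (l.length : Int) 1).foldl
    (fun (p : Int × Int) (i : Int) =>
      if PySem.List.count l (PySem.List.pyGetD l i 0) = l.length then
        (p.1 + 1, p.2 + 1)
      else if PySem.List.pyGetD l (i - 1) 0 < PySem.List.pyGetD l i 0 then
        (p.1 + 1, p.2)
      else if PySem.List.pyGetD l i 0 < PySem.List.pyGetD l (i - 1) 0 then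
        (p.1, p.2 + 1)
      else p)
    ((0 : Int), (0 : Int))
  -- l[i] / l[i-1] ported with pyGetD: every index drawn from range(1, len(l)) is in range
  if s.1 = 0 ∧ s.2 = 0 ∧ l.length = 0 then "The list is empty."
  else if s.1 < s.2 ∧ s.1 = 0 ∧ s.1 ≠ (l.length : Int) then "The list is in non-increasing order."
  else if s.2 < s.1 ∧ s.2 = 0 ∧ s.1 ≠ (l.length : Int) then "The list is in non-decreasing order."
  else if s.1 = (l.length : Int) - 1 ∧ s.2 = (l.length : Int) - 1 then "The list is in non-increasing and non-decreasing order."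
  else "The list is in random order."

-- ===== PORT B =====
def check_order_alt (l : List Int) : String :=
  if l = [] then "The list is empty."
  else
    let asc := l = PySem.List.sorted l (fun x => x) false
    let desc := l = PySem.List.sorted l (fun x => x) true
    if asc ∧ desc then "The list is in non-increasing and non-decreasing order."
    else if asc then "The list is in non-decreasing order."
    else if desc then "The list is in non-increasing order."
    else "The list is in random order."

-- ===== PRECONDITION & SPEC =====
def Spec_check_order (l : List Int) (out : String) : Prop := out = check_order_alt l
instance (l : List Int) (out : String) : Decidable (Spec_check_order l out) := by unfold Spec_check_order; infer_instance

-- ===== CLAIM (what is proved, stated in full; the proofs are below) =====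
def Claim_equal_check_order : Prop := ∀ (l : List Int), Dom_check_order l → Spec_check_order l (check_order l)

-- ===== LEMMAS AND PROOFS =====

-- the two 0/1 counters of A's loop, as predicates on an adjacent pair (q.1 = l[i-1], q.2 = l[i])
def pvAsc (l : List Int) (q : Int × Int) : Bool :=
  if PySem.List.count l q.2 = l.length then true else decide (q.1 < q.2)
def pvDesc (l : List Int) (q : Int × Int) : Bool :=
  if PySem.List.count l q.2 = l.length then true else decide (q.2 < q.1)

-- an index fold over range(1, len l) reading l[k] and l[k-1] is a fold over adjacent pairs
lemma pv_foldl_adj {β : Type} (g : β → Int → Int → β) :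
    ∀ (a : Int) (t : List Int) (init : β),
      (List.range t.length).foldl (fun p k => g p ((a :: t).getD k 0) (t.getD k 0)) init
        = ((a :: t).zip t).foldl (fun p q => g p q.1 q.2) init := by
  intro a t
  induction t generalizing a with
  | nil => intro init; rfl
  | cons b t ih =>
    intro init
    simp only [List.length_cons, List.range_succ_eq_map, List.foldl_cons, List.foldl_map,
      List.getD_cons_zero, List.getD_cons_succ, Nat.succ_eq_add_one, List.zip_cons_cons]
    exact ih b (g init a b)

-- a fold incrementing two counters by independent tests is a pair of countP's
lemma pv_foldl_counts (f g : Int × Int → Bool) :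
    ∀ (xs : List (Int × Int)) (x y : Int),
      xs.foldl (fun p q => ((if f q then p.1 + 1 else p.1), (if g q then p.2 + 1 else p.2))) (x, y)
        = (x + (xs.countP f : Int), y + (xs.countP g : Int)) := by
  intro xs
  induction xs with
  | nil => intro x y; simp
  | cons q xs ih =>
    intro x y
    simp only [List.foldl_cons, ih, List.countP_cons]
    split_ifs <;> simp_all <;> omega

-- A's loop computes exactly the two pair counts
lemma pv_fold_eq (a : Int) (t : List Int) :
    (PySem.List.pyRange 1 ((a :: t).length : Int) 1).foldl
      (fun (p : Int × Int) (i : Int) =>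
        if PySem.List.count (a :: t) (PySem.List.pyGetD (a :: t) i 0) = (a :: t).length then
          (p.1 + 1, p.2 + 1)
        else if PySem.List.pyGetD (a :: t) (i - 1) 0 < PySem.List.pyGetD (a :: t) i 0 then
          (p.1 + 1, p.2)
        else if PySem.List.pyGetD (a :: t) i 0 < PySem.List.pyGetD (a :: t) (i - 1) 0 then
          (p.1, p.2 + 1)
        else p)
      ((0 : Int), (0 : Int))
    = ((((a :: t).zip t).countP (pvAsc (a :: t)) : Int), (((a :: t).zip t).countP (pvDesc (a :: t)) : Int)) := by
  rw [PySem.List.pyRange_one]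
  have hlen : (((a :: t).length : Int) - 1).toNat = t.length := by
    simp [List.length_cons]
  rw [hlen, List.foldl_map]
  have hbody : (fun (p : Int × Int) (k : Nat) =>
      if PySem.List.count (a :: t) (PySem.List.pyGetD (a :: t) (1 + (k : Int)) 0) = (a :: t).length then
        (p.1 + 1, p.2 + 1)
      else if PySem.List.pyGetD (a :: t) (1 + (k : Int) - 1) 0 < PySem.List.pyGetD (a :: t) (1 + (k : Int)) 0 then
        (p.1 + 1, p.2)
      else if PySem.List.pyGetD (a :: t) (1 + (k : Int)) 0 < PySem.List.pyGetD (a :: t) (1 + (k : Int) - 1) 0 then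
        (p.1, p.2 + 1)
      else p)
      = (fun (p : Int × Int) (k : Nat) =>
        if PySem.List.count (a :: t) (t.getD k 0) = (a :: t).length then
          (p.1 + 1, p.2 + 1)
        else if (a :: t).getD k 0 < t.getD k 0 then
          (p.1 + 1, p.2)
        else if t.getD k 0 < (a :: t).getD k 0 then
          (p.1, p.2 + 1)
        else p) := by
    funext p k
    have h1 : (1 + (k : Int)) = ((k + 1 : Nat) : Int) := by push_cast; ring
    have h2 : (1 + (k : Int) - 1) = ((k : Nat) : Int) := by ring
    rw [h2, h1, PySem.List.pyGetD_natCast, PySem.List.pyGetD_natCast, List.getD_cons_succ]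
  rw [hbody, pv_foldl_adj (fun p x y =>
      if PySem.List.count (a :: t) y = (a :: t).length then (p.1 + 1, p.2 + 1)
      else if x < y then (p.1 + 1, p.2)
      else if y < x then (p.1, p.2 + 1)
      else p) a t]
  have hstep : (fun (p : Int × Int) (q : Int × Int) =>
      if PySem.List.count (a :: t) q.2 = (a :: t).length then (p.1 + 1, p.2 + 1)
      else if q.1 < q.2 then (p.1 + 1, p.2)
      else if q.2 < q.1 then (p.1, p.2 + 1)
      else p)
      = (fun (p : Int × Int) (q : Int × Int) =>
        ((if pvAsc (a :: t) q then p.1 + 1 else p.1), (if pvDesc (a :: t) q then p.2 + 1 else p.2))) := by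
    funext p q
    unfold pvAsc pvDesc
    simp only [PySem.List.count_eq, List.length_cons]
    by_cases hc : List.count q.2 (a :: t) = t.length + 1
    · simp [hc]
    · by_cases hlt : q.1 < q.2
      · simp [hc, hlt, lt_asymm hlt]
      · by_cases hgt : q.2 < q.1
        · simp [hc, hlt, hgt]
        · simp [hc, hlt, hgt]
  rw [hstep, pv_foldl_counts]
  simp

-- adjacent-pair conditions vs IsChain
lemma pv_zip_chain (R : Int → Int → Prop) :
    ∀ (l : List Int), (∀ q ∈ l.zip l.tail, R q.1 q.2) ↔ l.IsChain R := by
  intro l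
  induction l with
  | nil => simp
  | cons a t ih =>
    cases t with
    | nil => simp
    | cons b t =>
      constructor
      · intro h
        refine List.IsChain.cons_cons (h (a, b) (by simp)) ?_
        exact (ih).mp (fun q hq => h q (by simpa using List.mem_cons_of_mem _ hq))
      · intro h q hq
        rcases List.isChain_cons_cons.mp h with ⟨hab, ht⟩
        simp only [List.tail_cons, List.zip_cons_cons, List.mem_cons] at hq
        rcases hq with rfl | hq
        · exact hab
        · exact (ih).mpr ht q (by simpa using hq)

lemma pv_pairwise_of_all_eq (l : List Int) (a : Int) (h : ∀ x ∈ l, x = a)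
    (R : Int → Int → Prop) (hr : R a a) : l.Pairwise R := by
  induction l with
  | nil => exact List.Pairwise.nil
  | cons b t ih =>
    have hb := h b (by simp)
    refine List.pairwise_cons.mpr ⟨fun y hy => ?_, ih (fun x hx => h x (List.mem_cons_of_mem _ hx))⟩
    have := h y (List.mem_cons_of_mem _ hy)
    rw [hb, this]; exact hr

-- the sorted-comparison of B, characterised by descent/ascent counts (on a non-all-equal list)
lemma pv_asc_iff (l : List Int) :
    (l.zip l.tail).countP (fun q => decide (q.2 < q.1)) = 0 ↔ l = PySem.List.sorted l (fun x => x) false := by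
  constructor
  · intro h
    have h' : ∀ q ∈ l.zip l.tail, (q.1 : Int) ≤ q.2 := by
      intro q hq
      have := List.countP_eq_zero.mp h q hq
      simp at this; omega
    have hp : l.Pairwise (fun x y : Int => x ≤ y) :=
      ((pv_zip_chain (fun x y : Int => x ≤ y) l).mp h').pairwise
    exact (PySem.List.sorted_eq_self_of_pairwise l (fun x => x) hp).symm
  · intro h
    have hp : l.Pairwise (fun x y : Int => x ≤ y) := by
      have := PySem.List.sorted_pairwise l (fun x => x)
      rwa [← h] at this
    refine List.countP_eq_zero.mpr (fun q hq => ?_)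
    have := (pv_zip_chain (fun x y : Int => x ≤ y) l).mpr hp.isChain q hq
    simp; omega
lemma pv_desc_iff (l : List Int) :
    (l.zip l.tail).countP (fun q => decide (q.1 < q.2)) = 0 ↔ l = PySem.List.sorted l (fun x => x) true := by
  constructor
  · intro h
    have h' : ∀ q ∈ l.zip l.tail, (q.2 : Int) ≤ q.1 := by
      intro q hq
      have := List.countP_eq_zero.mp h q hq
      simp at this; omega
    have hp : l.Pairwise (fun x y : Int => y ≤ x) :=
      ((pv_zip_chain (fun x y : Int => y ≤ x) l).mp h').pairwise
    exact (PySem.List.sorted_rev_eq_self_of_pairwise l (fun x => x) hp).symm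
  · intro h
    have hp : l.Pairwise (fun x y : Int => y ≤ x) := by
      have := PySem.List.sorted_pairwise_rev l (fun x => x)
      rwa [← h] at this
    refine List.countP_eq_zero.mpr (fun q hq => ?_)
    have := (pv_zip_chain (fun x y : Int => y ≤ x) l).mpr hp.isChain q hq
    simp; omega


-- ===== VERDICT (by name: the statement is the Claim_ definition above) =====
theorem check_order_spec : Claim_equal_check_order := by
  intro l _
  unfold Spec_check_order
  cases l with
  | nil => decide
  | cons a t =>
    simp only [check_order, check_order_alt, pv_fold_eq a t]
    have hplen : ((a :: t).zip t).length = t.length := by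
      simp [List.length_zip]
    by_cases hall : ∀ x ∈ a :: t, x = a
    · -- all elements equal
      have hcount : PySem.List.count (a :: t) a = (a :: t).length := by
        rw [PySem.List.count_eq, List.count_eq_length]
        intro b hb; exact (hall b hb).symm
      have hA : ((a :: t).zip t).countP (pvAsc (a :: t)) = t.length := by
        rw [← hplen]
        refine List.countP_eq_length.mpr (fun q hq => ?_)
        have h2 : q.2 = a := hall q.2 (List.mem_cons_of_mem _ (List.of_mem_zip (a := q.1) (b := q.2) (by simpa using hq)).2)
        unfold pvAsc; rw [h2, if_pos hcount]
      have hD : ((a :: t).zip t).countP (pvDesc (a :: t)) = t.length := by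
        rw [← hplen]
        refine List.countP_eq_length.mpr (fun q hq => ?_)
        have h2 : q.2 = a := hall q.2 (List.mem_cons_of_mem _ (List.of_mem_zip (a := q.1) (b := q.2) (by simpa using hq)).2)
        unfold pvDesc; rw [h2, if_pos hcount]
      have hasc : (a :: t) = PySem.List.sorted (a :: t) (fun x => x) false :=
        (PySem.List.sorted_eq_self_of_pairwise _ _ (pv_pairwise_of_all_eq _ a hall _ (le_refl a))).symm
      have hdesc : (a :: t) = PySem.List.sorted (a :: t) (fun x => x) true :=
        (PySem.List.sorted_rev_eq_self_of_pairwise _ _ (pv_pairwise_of_all_eq _ a hall _ (le_refl a))).symm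
      rw [hA, hD]
      rw [if_neg (by simp), if_neg (by simp), if_neg (by simp),
        if_pos (by simp only [List.length_cons]; push_cast; omega),
        if_neg (List.cons_ne_nil a t), if_pos ⟨hasc, hdesc⟩]
    · -- not all equal: the all-equal count test is false on every pair
      have hC : ∀ q ∈ (a :: t).zip t, ¬ (PySem.List.count (a :: t) q.2 = (a :: t).length) := by
        intro q hq hcnt
        rw [PySem.List.count_eq, List.count_eq_length] at hcnt
        exact hall (fun x hx => ((hcnt x hx).symm).trans (hcnt a (by simp)))
      have hA : ((a :: t).zip t).countP (pvAsc (a :: t))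
          = ((a :: t).zip t).countP (fun q => decide (q.1 < q.2)) := by
        refine List.countP_congr (fun q hq => ?_)
        unfold pvAsc; rw [if_neg (hC q hq)]
      have hD : ((a :: t).zip t).countP (pvDesc (a :: t))
          = ((a :: t).zip t).countP (fun q => decide (q.2 < q.1)) := by
        refine List.countP_congr (fun q hq => ?_)
        unfold pvDesc; rw [if_neg (hC q hq)]
      rw [hA, hD]
      set na := ((a :: t).zip t).countP (fun q => decide (q.1 < q.2)) with hna
      set nd := ((a :: t).zip t).countP (fun q => decide (q.2 < q.1)) with hnd
      have hnot00 : ¬ (na = 0 ∧ nd = 0) := by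
        rintro ⟨h1, h2⟩
        have h' : ∀ q ∈ (a :: t).zip t, q.1 = (q.2 : Int) := by
          intro q hq
          have hx := List.countP_eq_zero.mp h1 q hq
          have hy := List.countP_eq_zero.mp h2 q hq
          simp at hx hy; omega
        have hp : (a :: t).Pairwise (fun x y : Int => x = y) :=
          ((pv_zip_chain (fun x y : Int => x = y) (a :: t)).mp h').pairwise
        exact hall (fun x hx => by
          rcases List.mem_cons.mp hx with rfl | hx
          · rfl
          · exact ((List.pairwise_cons.mp hp).1 x hx).symm)
      have hnale : na ≤ t.length := hplen ▸ List.countP_le_length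
      have hndle : nd ≤ t.length := hplen ▸ List.countP_le_length
      by_cases h1 : na = 0
      · have h2 : nd ≠ 0 := fun h => hnot00 ⟨h1, h⟩
        have hdesc : (a :: t) = PySem.List.sorted (a :: t) (fun x => x) true :=
          (pv_desc_iff (a :: t)).mp h1
        have hnasc : ¬ ((a :: t) = PySem.List.sorted (a :: t) (fun x => x) false) := by
          intro h
          exact h2 ((pv_asc_iff (a :: t)).mpr h)
        rw [if_neg (by simp), if_pos (by simp only [List.length_cons]; push_cast; omega),
          if_neg (List.cons_ne_nil a t), if_neg (fun h => hnasc h.1), if_neg hnasc, if_pos hdesc]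
      · by_cases h2 : nd = 0
        · have hasc : (a :: t) = PySem.List.sorted (a :: t) (fun x => x) false :=
            (pv_asc_iff (a :: t)).mp h2
          have hndesc : ¬ ((a :: t) = PySem.List.sorted (a :: t) (fun x => x) true) := by
            intro h
            exact h1 ((pv_desc_iff (a :: t)).mpr h)
          rw [if_neg (by simp), if_neg (by simp only [List.length_cons]; push_cast; omega),
            if_pos (by simp only [List.length_cons]; push_cast; omega),
            if_neg (List.cons_ne_nil a t), if_neg (fun h => hndesc h.2), if_pos hasc]
        · -- both an ascent and a descent: random
          have hna_lt : na < t.length := by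
            by_contra h
            have hlen2 : ((a :: t).zip t).countP (fun q => decide (q.1 < q.2)) = ((a :: t).zip t).length := by
              rw [← hna, hplen]; omega
            exact h2 (List.countP_eq_zero.mpr (fun q hq => by
              have := List.countP_eq_length.mp hlen2 q hq
              simp at this ⊢; omega))
          have hnasc : ¬ ((a :: t) = PySem.List.sorted (a :: t) (fun x => x) false) := by
            intro h
            exact h2 ((pv_asc_iff (a :: t)).mpr h)
          have hndesc : ¬ ((a :: t) = PySem.List.sorted (a :: t) (fun x => x) true) := by
            intro h
            exact h1 ((pv_desc_iff (a :: t)).mpr h)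
          rw [if_neg (by simp), if_neg (by simp only [List.length_cons]; push_cast; omega),
            if_neg (by simp only [List.length_cons]; push_cast; omega),
            if_neg (by simp only [List.length_cons]; push_cast; omega),
            if_neg (List.cons_ne_nil a t), if_neg (fun h => hnasc h.1), if_neg hnasc, if_neg hndesc]
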